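-- pv_equiv track=rewrite | github.com/sjwhole/baekjoon_py | 1018_c1.py | get_row_length
-- ===== SOURCE A (Python) =====
-- def get_row_length(ls):
--     for i in range(len(ls)):
--         if len(ls[i]) != 0:
--             start = i
--             break
--     for j in range(len(ls) - 1, -1, -1):
--         if len(ls[j]) != 0:
--             end = j
--             break
--     if start == end:
--         return 1
--     else:
--         return end - start + 1
-- ===== SOURCE B (Python) =====
-- def get_row_length(ls):
--     start = None
--     end = None
--     for i, row in enumerate(ls):
--         if len(row) != 0:
--             if start is None:
--                 start = i
--             end = i
--     return end - start + 1
-- ===== Notes on version B (the rewrite author's own statement) =====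
-- stated objective: alternative
-- what changed: Replaced A's two boundary-anchored early-breaking index scans (forward for the first non-empty row, backward for the last) by one forward enumerate pass that maintains running first/last non-empty indices, returning end - start + 1 directly (A's start == end branch is subsumed).
import Mathlib
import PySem

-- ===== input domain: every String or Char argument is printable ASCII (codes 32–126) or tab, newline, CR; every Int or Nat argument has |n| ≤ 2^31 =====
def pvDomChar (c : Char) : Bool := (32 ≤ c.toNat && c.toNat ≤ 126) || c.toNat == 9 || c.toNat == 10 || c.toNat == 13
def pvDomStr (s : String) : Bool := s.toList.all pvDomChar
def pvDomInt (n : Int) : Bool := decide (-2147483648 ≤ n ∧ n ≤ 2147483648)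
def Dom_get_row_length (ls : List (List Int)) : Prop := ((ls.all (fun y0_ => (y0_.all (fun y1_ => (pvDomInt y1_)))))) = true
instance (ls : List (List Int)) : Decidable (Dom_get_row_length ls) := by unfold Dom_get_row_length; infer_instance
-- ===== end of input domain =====

-- B replaces A's two early-breaking boundary scans with one forward pass keeping running
-- first/last non-empty indices (objective: alternative decomposition, same cost).
-- Pre_ excludes lists with no non-empty row, where A raises UnboundLocalError (B raises too).

-- ===== PORT A =====
-- first loop of A: scan forward, break at the first non-empty row (i is the running index)
def findStartA : List (List Int) → Int → Option Int
  | [], _ => none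
  | r :: rest, i => if r.length ≠ 0 then some i else findStartA rest (i + 1)

-- second loop of A: j runs over range(len(ls)-1, -1, -1); fuel = j+1.
-- ls.getD j [] is exact for ls[j] since 0 ≤ j < len ls inside the loop.
def findEndA (ls : List (List Int)) : Nat → Option Int
  | 0 => none
  | j + 1 => if (ls.getD j []).length ≠ 0 then some (j : Int) else findEndA ls j

def get_row_length (ls : List (List Int)) : Int :=
  match findStartA ls 0, findEndA ls ls.length with
  | some s, some e => if s = e then 1 else e - s + 1
  | _, _ => 0   -- unreachable under Pre_: here Python A raises UnboundLocalError

-- ===== PORT B =====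
-- one step of B's single forward pass: p = (start, end) (None = not yet assigned)
def stepB (p : Option Int × Option Int) (ie : Int × List Int) : Option Int × Option Int :=
  if ie.2.length ≠ 0 then
    ((match p.1 with | none => some ie.1 | some s => some s), some ie.1)
  else p

def get_row_length_alt (ls : List (List Int)) : Int :=
  match (PySem.List.enumerate ls).foldl stepB (none, none) with
  | (some s, some e) => e - s + 1
  | (none, _) => 0   -- unreachable under Pre_: here Python B raises TypeError (start/end still None)
  | (_, none) => 0

-- ===== PRECONDITION & SPEC =====
-- Pre_ excludes exactly the inputs with no non-empty row: there A never binds start/end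
-- and raises UnboundLocalError (B raises TypeError).
def Pre_get_row_length (ls : List (List Int)) : Prop := ∃ r ∈ ls, r ≠ []
instance (ls : List (List Int)) : Decidable (Pre_get_row_length ls) := by unfold Pre_get_row_length; infer_instance

def pvWitness_get_row_length : List (List Int) := [[], [3], [], [1, 2]]

def Spec_get_row_length (ls : List (List Int)) (out : Int) : Prop := out = get_row_length_alt ls
instance (ls : List (List Int)) (out : Int) : Decidable (Spec_get_row_length ls out) := by unfold Spec_get_row_length; infer_instance

-- ===== CLAIM (what is proved, stated in full; the proofs are below) =====
def Claim_equal_get_row_length : Prop := ∀ (ls : List (List Int)), Dom_get_row_length ls → Pre_get_row_length ls → Spec_get_row_length ls (get_row_length ls)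

-- ===== LEMMAS AND PROOFS =====

theorem findStartA_append (ls : List (List Int)) (r : List Int) (i : Int) :
    findStartA (ls ++ [r]) i =
      match findStartA ls i with
      | some s => some s
      | none => if r.length ≠ 0 then some (i + ls.length) else none := by
  induction ls generalizing i with
  | nil => simp [findStartA]
  | cons h t ih =>
      by_cases hh : h.length ≠ 0
      · simp [findStartA, hh]
      · have h1 : findStartA ((h :: t) ++ [r]) i = findStartA (t ++ [r]) (i + 1) := by
          simp [findStartA, hh]
        have h2 : findStartA (h :: t) i = findStartA t (i + 1) := by
          simp [findStartA, hh]
        rw [h1, ih, h2]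
        cases findStartA t (i + 1) with
        | some s => rfl
        | none =>
            by_cases hr : r.length ≠ 0
            · rw [if_pos hr]
              have h3 : i + 1 + (t.length : Int) = i + ((h :: t).length : Int) := by
                simp; omega
              rw [h3]
              simp [hr]
            · simp [hr]

theorem findEndA_append_lt (ls : List (List Int)) (r : List Int) (n : Nat) (hn : n ≤ ls.length) :
    findEndA (ls ++ [r]) n = findEndA ls n := by
  induction n with
  | zero => rfl
  | succ j ih =>
      have hj : j < ls.length := by omega
      have hget : (ls ++ [r]).getD j [] = ls.getD j [] := by
        simp [List.getD, List.getElem?_append_left hj]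
      rw [findEndA, findEndA, hget, ih (by omega)]

theorem findEndA_append (ls : List (List Int)) (r : List Int) :
    findEndA (ls ++ [r]) (ls.length + 1) =
      if r.length ≠ 0 then some (ls.length : Int) else findEndA ls ls.length := by
  have hget : (ls ++ [r]).getD ls.length [] = r := by
    simp [List.getD]
  rw [findEndA, hget]
  by_cases hr : r.length ≠ 0
  · simp [hr]
  · simp [hr, findEndA_append_lt ls r ls.length (le_refl _)]

theorem foldB_inv (ls : List (List Int)) :
    (PySem.List.enumerate ls).foldl stepB (none, none) =
      (findStartA ls 0, findEndA ls ls.length) := by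
  induction ls using List.reverseRecOn with
  | nil => rfl
  | append_singleton t r ih =>
      rw [PySem.List.enumerate_append, List.foldl_append, ih]
      simp only [PySem.List.enumerate_cons, PySem.List.enumerate_nil, List.foldl_cons,
        List.foldl_nil, List.length_append, List.length_singleton]
      rw [findStartA_append, findEndA_append]
      by_cases hr : r.length ≠ 0
      · cases findStartA t 0 <;> simp [stepB, hr]
      · cases findStartA t 0 <;> simp [stepB, hr]

theorem findStartA_none (ls : List (List Int)) (i : Int) (h : findStartA ls i = none) :
    ∀ r ∈ ls, r = [] := by
  induction ls generalizing i with
  | nil => simp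
  | cons hd t ih =>
      intro r hr
      by_cases hh : hd.length ≠ 0
      · simp [findStartA, hh] at h
      · simp only [findStartA, hh, ite_false] at h
        rcases List.mem_cons.mp hr with rfl | hmem
        · simpa using hh
        · exact ih (i + 1) h r hmem

-- ===== VERDICT (by name: the statement is the Claim_ definition above) =====
theorem get_row_length_spec : Claim_equal_get_row_length := by
  intro ls _ hpre
  unfold Spec_get_row_length get_row_length get_row_length_alt
  rw [foldB_inv]
  cases hs : findStartA ls 0 with
  | none =>
      obtain ⟨r, hr, hne⟩ := hpre
      exact absurd (findStartA_none ls 0 hs r hr) hne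
  | some s =>
      cases he : findEndA ls ls.length with
      | none => simp
      | some e =>
          by_cases hse : s = e
          · subst hse; simp
          · simp [hse]
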